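-- pv_equiv track=rewrite | github.com/hieu3210/pyLTS | NEW/scripts/extract_pdf_text.py | find_experiments_section
-- ===== SOURCE A (Python) =====
-- from typing import Optional
--
-- def find_experiments_section(text: str) -> Optional[str]:
--     lower = text.lower()
--     idx = lower.find('experiment')
--     if idx == -1:
--         return None
--     endings = ['conclusion', 'conclusions', 'reference', 'references', 'acknowledg', 'future work', '\n\s*\d+\.']
--     tail_idx = len(text)
--     for e in endings:
--         j = lower.find(e, idx + 1)
--         if j != -1 and j < tail_idx:
--             tail_idx = j
--     return text[idx:tail_idx]
-- ===== SOURCE B (Python) =====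
-- import re
-- from typing import Optional
--
-- _ENDINGS = ['conclusion', 'conclusions', 'reference', 'references',
--             'acknowledg', 'future work', '\n\s*\d+\.']
-- _END_RE = re.compile('|'.join(re.escape(e) for e in _ENDINGS))
--
-- def find_experiments_section(text: str) -> Optional[str]:
--     lower = text.lower()
--     idx = lower.find('experiment')
--     if idx == -1:
--         return None
--     m = _END_RE.search(lower, idx + 1)
--     tail_idx = m.start() if m else len(text)
--     return text[idx:tail_idx]
-- ===== Notes on version B (the rewrite author's own statement) =====
-- stated objective: idiomatic
-- what changed: A's loop of seven separate lower.find scans (one full pass per ending marker, keeping the minimum hit) is replaced by one compiled regex alternation of the escaped markers, searched once from idx+1; the tail index is the single match's start or len(text).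
import Mathlib
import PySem

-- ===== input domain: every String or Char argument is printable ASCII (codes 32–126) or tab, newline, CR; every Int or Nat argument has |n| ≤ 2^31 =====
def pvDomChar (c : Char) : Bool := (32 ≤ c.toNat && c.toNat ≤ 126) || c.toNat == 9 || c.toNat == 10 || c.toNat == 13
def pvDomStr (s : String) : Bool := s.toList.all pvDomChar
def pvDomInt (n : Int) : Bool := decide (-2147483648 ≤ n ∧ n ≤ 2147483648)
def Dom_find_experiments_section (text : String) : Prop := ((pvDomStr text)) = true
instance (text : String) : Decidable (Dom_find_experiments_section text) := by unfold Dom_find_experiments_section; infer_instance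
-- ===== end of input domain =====

-- B replaces A's loop of seven repeated `find` scans by one combined left-to-right scan
-- (in Python: a single compiled regex alternation of the escaped markers); objective: idiomatic.

-- The shared list of ending markers (plain data used by both versions).
def pvEndings : List (List Char) :=
  ["conclusion".toList, "conclusions".toList, "reference".toList, "references".toList,
   "acknowledg".toList, "future work".toList, "\n\\s*\\d+\\.".toList]

-- ===== PORT A =====
-- for e in endings: j = lower.find(e, idx+1); if j != -1 and j < tail_idx: tail_idx = j
def find_experiments_section (text : String) : Option String :=
  let lower := PySem.Chars.lower text.toList
  let idx := PySem.Chars.find lower "experiment".toList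
  if idx = -1 then none
  else
    let tail := pvEndings.foldl (fun tail e =>
        let j := PySem.Chars.findFrom lower e (idx + 1)
        if j ≠ -1 ∧ j < tail then j else tail) ((text.toList.length : Int))
    some (String.ofList (PySem.List.slice text.toList (some idx) (some tail)))

-- ===== PORT B =====
-- regex alternation match attempt at one position: does some marker start here?
def pvMatchesAny (s : List Char) : Bool := pvEndings.any (fun e => PySem.Chars.startswith s e)

-- the regex engine's scan: try each position left to right, return the first match start
def pvScanFrom : List Char → Int → Option Int
  | [], _ => none
  | c :: rest, p => if pvMatchesAny (c :: rest) then some p else pvScanFrom rest (p + 1)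

def find_experiments_section_alt (text : String) : Option String :=
  let lower := PySem.Chars.lower text.toList
  let idx := PySem.Chars.find lower "experiment".toList
  if idx = -1 then none
  else
    let tail := (pvScanFrom (lower.drop (idx + 1).toNat) (idx + 1)).getD (text.toList.length : Int)
    some (String.ofList (PySem.List.slice text.toList (some idx) (some tail)))

-- ===== PRECONDITION & SPEC =====
def Spec_find_experiments_section (text : String) (out : Option String) : Prop := out = find_experiments_section_alt text
instance (text : String) (out : Option String) : Decidable (Spec_find_experiments_section text out) := by unfold Spec_find_experiments_section; infer_instance

-- ===== CLAIM (what is proved, stated in full; the proofs are below) =====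
def Claim_equal_find_experiments_section : Prop := ∀ (text : String), Dom_find_experiments_section text → Spec_find_experiments_section text (find_experiments_section text)

-- ===== LEMMAS AND PROOFS =====

-- every ending marker is nonempty
lemma pvEndings_ne_nil : ∀ e ∈ pvEndings, e ≠ [] := by decide

lemma pvMatchesAny_nil : pvMatchesAny [] = false := by decide

-- A match at a position means some marker is a prefix of the suffix there
lemma pvMatchesAny_iff (s : List Char) :
    pvMatchesAny s = true ↔ ∃ e ∈ pvEndings, e <+: s := by
  simp [pvMatchesAny, List.any_eq_true, PySem.Chars.startswith_iff]

-- scan success characterisation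
lemma pvScanFrom_some (t : List Char) (p r : Int) (h : pvScanFrom t p = some r) :
    ∃ k : Nat, r = p + k ∧ k < t.length ∧ pvMatchesAny (t.drop k) = true ∧
      ∀ j < k, pvMatchesAny (t.drop j) = false := by
  induction t generalizing p r with
  | nil => simp [pvScanFrom] at h
  | cons c rest ih =>
    by_cases hm : pvMatchesAny (c :: rest) = true
    · refine ⟨0, ?_, by simp, by simpa using hm, by omega⟩
      simp [pvScanFrom, hm] at h; omega
    · simp [pvScanFrom, hm] at h
      obtain ⟨k, hk1, hk2, hk3, hk4⟩ := ih (p + 1) r h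
      refine ⟨k + 1, by omega, by simpa using hk2, by simpa using hk3, ?_⟩
      intro j hj
      cases j with
      | zero => simpa using Bool.of_not_eq_true hm
      | succ j' => simpa using hk4 j' (by omega)

-- scan failure characterisation
lemma pvScanFrom_none (t : List Char) (p : Int) (h : pvScanFrom t p = none) :
    ∀ j, pvMatchesAny (t.drop j) = false := by
  induction t generalizing p with
  | nil => intro j; simpa using pvMatchesAny_nil
  | cons c rest ih =>
    by_cases hm : pvMatchesAny (c :: rest) = true
    · simp [pvScanFrom, hm] at h
    · intro j
      cases j with
      | zero => simpa using Bool.of_not_eq_true hm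
      | succ j' =>
        simp [pvScanFrom, hm] at h
        simpa using ih (p + 1) h j'

-- the foldl of A is a fold of `min` over the successful find results
lemma pvFoldA_eq_foldMin (E : List (List Char)) (f : List Char → Int) (init : Int) :
    E.foldl (fun tail e => if f e ≠ -1 ∧ f e < tail then f e else tail) init
      = ((E.map f).filter (fun j => j ≠ -1)).foldl min init := by
  induction E generalizing init with
  | nil => rfl
  | cons e E ih =>
    simp only [List.foldl_cons, List.map_cons, List.filter_cons]
    by_cases h1 : f e = -1
    · simp [h1, ih]
    · have hmin : (if f e < init then f e else init) = min init (f e) := by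
        split_ifs <;> omega
      simp [h1, ih]
      rw [hmin]

lemma pvFoldMin_le (xs : List Int) (init : Int) :
    xs.foldl min init ≤ init ∧ ∀ x ∈ xs, xs.foldl min init ≤ x := by
  induction xs generalizing init with
  | nil => simp
  | cons x xs ih =>
    obtain ⟨h1, h2⟩ := ih (min init x)
    refine ⟨le_trans h1 (by omega), ?_⟩
    intro y hy
    rcases List.mem_cons.mp hy with h | h
    · subst h; exact le_trans h1 (by omega)
    · exact h2 y h

lemma pvFoldMin_mem (xs : List Int) (init : Int) :
    xs.foldl min init = init ∨ xs.foldl min init ∈ xs := by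
  induction xs generalizing init with
  | nil => simp
  | cons x xs ih =>
    rcases ih (min init x) with h | h
    · simp only [List.foldl_cons, h]
      rcases le_or_gt init x with h' | h'
      · left; omega
      · right
        have hx : min init x = x := by omega
        rw [hx]; exact List.mem_cons_self ..
    · right; exact List.mem_cons_of_mem _ h

-- core: the two tail computations agree
lemma pvTail_eq (l : List Char) (s : Nat) (hs : s ≤ l.length) :
    pvEndings.foldl (fun tail e =>
        if PySem.Chars.findFrom l e (s : Int) ≠ -1 ∧ PySem.Chars.findFrom l e (s : Int) < tail
        then PySem.Chars.findFrom l e (s : Int) else tail) ((l.length : Int))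
      = (pvScanFrom (l.drop s) (s : Int)).getD (l.length : Int) := by
  set f : List Char → Int := fun e => PySem.Chars.findFrom l e (s : Int) with hf
  -- facts about each find
  have ffind : ∀ e ∈ pvEndings, f e ≠ -1 →
      (s : Int) ≤ f e ∧ e <+: l.drop (f e).toNat ∧ ∀ i, s ≤ i → i < (f e).toNat → ¬ e <+: l.drop i := by
    intro e _ hne
    exact PySem.Chars.findFrom_natCast_spec l e s hs hne
  have ffind_none : ∀ e ∈ pvEndings, f e = -1 → ∀ i, s ≤ i → ¬ e <+: l.drop i := by
    intro e _ hne i hi hpre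
    rw [PySem.Chars.findFrom_natCast_eq_neg_one_iff l e s hs] at hne
    have hdrop : l.drop i = (l.drop s).drop (i - s) := by
      rw [List.drop_drop]; congr 1; omega
    rw [hdrop] at hpre
    exact hne (hpre.isInfix.trans (List.drop_suffix _ _).isInfix)
  rw [pvFoldA_eq_foldMin]
  set xs := (pvEndings.map f).filter (fun j => j ≠ -1) with hxs
  set tailA := xs.foldl min (l.length : Int) with htailA
  have hxs_mem : ∀ x ∈ xs, ∃ e ∈ pvEndings, f e = x ∧ x ≠ -1 := by
    intro x hx
    simp only [hxs, List.mem_filter, List.mem_map, decide_not] at hx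
    obtain ⟨⟨e, he, hfe⟩, hx2⟩ := hx
    exact ⟨e, he, hfe, by simpa using hx2⟩
  have hA_le_init : tailA ≤ (l.length : Int) := (pvFoldMin_le xs _).1
  have hA_le : ∀ x ∈ xs, tailA ≤ x := (pvFoldMin_le xs _).2
  have hA_mem := pvFoldMin_mem xs (l.length : Int)
  -- positions with a match witness a member of xs that is ≤ the position
  have hxs_of_match : ∀ p : Nat, s ≤ p → pvMatchesAny (l.drop p) = true → ∃ x ∈ xs, x ≤ (p : Int) := by
    intro p hp hm
    obtain ⟨e, he, hpre⟩ := (pvMatchesAny_iff _).mp hm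
    have hne : f e ≠ -1 := by
      intro h; exact ffind_none e he h p hp hpre
    refine ⟨f e, by
      simp only [hxs, List.mem_filter, List.mem_map, decide_not]
      exact ⟨⟨e, he, rfl⟩, by simpa using hne⟩, ?_⟩
    obtain ⟨h1, h2, h3⟩ := ffind e he hne
    by_contra hlt
    rw [Int.not_le] at hlt
    exact h3 p hp (by omega) hpre
  -- each member of xs is a match position ≥ s, < length
  have hmatch_of_xs : ∀ x ∈ xs, (s : Int) ≤ x ∧ x < (l.length : Int) ∧ pvMatchesAny (l.drop x.toNat) = true := by
    intro x hx
    obtain ⟨e, he, hfe, hne⟩ := hxs_mem x hx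
    obtain ⟨h1, h2, _⟩ := ffind e he (hfe ▸ hne)
    rw [hfe] at h1 h2
    have hlen : x.toNat < l.length := by
      have hne' := pvEndings_ne_nil e he
      have := h2.length_le
      have hdl : (l.drop x.toNat).length = l.length - x.toNat := List.length_drop ..
      have : 0 < e.length := List.length_pos_of_ne_nil hne'
      omega
    exact ⟨h1, by omega, (pvMatchesAny_iff _).mpr ⟨e, he, h2⟩⟩
  -- case on the scan result
  rcases hscan : pvScanFrom (l.drop s) (s : Int) with _ | r
  · -- no match anywhere: xs must be empty-ish; tailA = length
    have hnomatch : ∀ p : Nat, s ≤ p → pvMatchesAny (l.drop p) = false := by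
      intro p hp
      have := pvScanFrom_none _ _ hscan (p - s)
      rwa [List.drop_drop, show s + (p - s) = p by omega] at this
    have hxs_nil : xs = [] := by
      rcases hcase : xs with _ | ⟨x, xs'⟩
      · rfl
      · exfalso
        have hx : x ∈ xs := by rw [hcase]; exact List.mem_cons_self ..
        obtain ⟨h1, h2, h3⟩ := hmatch_of_xs x hx
        have := hnomatch x.toNat (by omega)
        rw [this] at h3; exact Bool.false_ne_true h3
    rw [htailA, hxs_nil]
    rfl
  · -- match at r: tailA = r by antisymmetry
    obtain ⟨k, hr1, hk2, hk3, hk4⟩ := pvScanFrom_some _ _ _ hscan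
    rw [List.drop_drop] at hk3
    have hrlen : (l.drop s).length = l.length - s := List.length_drop ..
    -- tailA ≤ r
    have hle1 : tailA ≤ r := by
      obtain ⟨x, hx, hxle⟩ := hxs_of_match (s + k) (by omega) hk3
      have := hA_le x hx
      omega
    -- r ≤ tailA
    have hle2 : r ≤ tailA := by
      rcases hA_mem with h | h
      · omega
      · obtain ⟨h1, h2, h3⟩ := hmatch_of_xs tailA h
        by_contra hlt
        rw [Int.not_le] at hlt
        have hj : tailA.toNat - s < k := by omega
        have := hk4 (tailA.toNat - s) hj
        rw [List.drop_drop, show s + (tailA.toNat - s) = tailA.toNat by omega] at this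
        rw [this] at h3; exact Bool.false_ne_true h3
    simp only [Option.getD_some]
    omega

-- length is preserved by lower
lemma pvLower_length (l : List Char) : (PySem.Chars.lower l).length = l.length := by
  simp [PySem.Chars.lower]

-- ===== VERDICT (by name: the statement is the Claim_ definition above) =====
theorem find_experiments_section_spec : Claim_equal_find_experiments_section := by
  intro text _
  unfold Spec_find_experiments_section find_experiments_section find_experiments_section_alt
  set l := PySem.Chars.lower text.toList with hl
  set idx := PySem.Chars.find l "experiment".toList with hidx
  by_cases h : idx = -1
  · rw [if_pos h, if_pos h]
  · rw [if_neg h, if_neg h]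
    have hge : 0 ≤ idx := by
      have := PySem.Chars.neg_one_le_find l "experiment".toList
      rw [← hidx] at this; omega
    have hspec := PySem.Chars.find_spec (s := l) (sub := "experiment".toList) (hidx ▸ hge)
    rw [← hidx] at hspec
    have hlen10 : idx.toNat + 10 ≤ l.length := by
      have h1 := hspec.1.length_le
      have hd : (l.drop idx.toNat).length = l.length - idx.toNat := List.length_drop ..
      simp at h1; omega
    have hll : l.length = text.toList.length := pvLower_length text.toList
    have hcast : idx + 1 = ((idx.toNat + 1 : Nat) : Int) := by omega
    have htn : (idx + 1).toNat = idx.toNat + 1 := by omega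
    have key := pvTail_eq l (idx.toNat + 1) (by omega)
    rw [← hcast, hll] at key
    rw [htn, key]
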